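-- pv_equiv track=rewrite | github.com/miliar/Code_Jam_Webscraper | solutions_python/Problem_201/1422.py | solve
-- ===== SOURCE A (Python) =====
-- import heapq
--
-- def solve(n, k):
--     l, s = 0, 0
--     heap = [-n]
--     heapq.heapify(heap)
--     for i in range(k):
--         temp = abs(heapq.heappop(heap))
--         l, s = split(temp)
--         heapq.heappush(heap, -l)
--         heapq.heappush(heap, -s)
--     return l, s
--
-- def split(n):
--     k = (n - 1) // 2
--     l, s = n - 1 - k, k
--     return max(l, s), min(l, s)
-- ===== SOURCE B (Python) =====
-- def solve(n, k):
--     # Level/group simulation: the heap is kept as (value, count) groups; all copies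
--     # of the current minimum stored value are split at once, so the number of loop
--     # iterations depends on the number of distinct value levels, not on k.
--     l, s = 0, 0
--     groups = [(-n, 1)]
--     rem = k
--     while rem > 0:
--         v = min(x for (x, _) in groups)
--         m = sum(c for (x, c) in groups if x == v)
--         t = abs(v)
--         q = (t - 1) // 2
--         l, s = max(t - 1 - q, q), min(t - 1 - q, q)
--         if rem <= m:
--             break
--         if -l == v:
--             # splitting v reproduces v: the minimum never changes, every later pop is v
--             break
--         rem -= m
--         groups = [(x, c) for (x, c) in groups if x != v] + [(-l, m), (-s, m)]
--     return l, s
-- ===== Notes on version B (the rewrite author's own statement) =====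
-- stated objective: faster
-- what changed: A pops one segment at a time from a heap for k iterations; B keeps the heap as (value, count) groups and splits all copies of the current minimum stored value in one step, so the loop runs once per distinct value level instead of once per pop.
import Mathlib
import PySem

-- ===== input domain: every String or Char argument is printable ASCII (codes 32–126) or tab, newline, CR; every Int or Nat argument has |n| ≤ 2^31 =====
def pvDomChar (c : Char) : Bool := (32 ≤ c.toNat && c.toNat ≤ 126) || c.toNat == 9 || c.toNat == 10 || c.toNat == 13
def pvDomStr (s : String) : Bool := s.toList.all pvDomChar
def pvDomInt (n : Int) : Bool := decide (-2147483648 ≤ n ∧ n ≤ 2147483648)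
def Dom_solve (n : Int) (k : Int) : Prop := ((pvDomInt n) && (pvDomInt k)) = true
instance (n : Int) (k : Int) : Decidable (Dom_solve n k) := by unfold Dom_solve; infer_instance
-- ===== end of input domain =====

-- B replaces A's per-pop heap loop by a grouped (value, count) level simulation; objective: faster.

-- ===== PORT A =====
-- helper 'split' of A
def pySplit (t : Int) : Int × Int :=
  let q := PySem.Int.floordiv (t - 1) 2
  let l := t - 1 - q
  (max l q, min l q)

-- A's for-loop over range(k); heapq is ported by its value semantics: the heap is the
-- list of stored values, heappop removes one occurrence of the minimum value, heappush
-- adds a value (exact: heappop returns the minimum, and the result depends only on values).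
def solveAux : Nat → Int → Int → List Int → Int × Int
  | 0, l, s, _ => (l, s)
  | i+1, _, _, heap =>
    let v := (PySem.List.min? heap (fun x => x)).getD 0
    let p := pySplit |v|
    solveAux i p.1 p.2 ((-p.1) :: (-p.2) :: heap.erase v)

def solve (n : Int) (k : Int) : List Int :=
  let r := solveAux k.toNat 0 0 [-n]
  [r.1, r.2]

-- ===== PORT B =====
-- B's while-loop: groups is the heap as (value, count) pairs; fuel k.toNat only makes the
-- recursion structural (rem decreases by at least 1 per iteration, so fuel never runs out).
def solveAltAux : Nat → Int → Int → Int → List (Int × Int) → Int × Int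
  | 0, _, l, s, _ => (l, s)
  | fuel+1, rem, l, s, groups =>
    if rem ≤ 0 then (l, s)
    else
      let v := (PySem.List.min? (groups.map Prod.fst) (fun x => x)).getD 0
      let m := ((groups.filter (fun g => g.1 == v)).map Prod.snd).sum
      let t := |v|
      let q := PySem.Int.floordiv (t - 1) 2
      let l' := max (t - 1 - q) q
      let s' := min (t - 1 - q) q
      if rem ≤ m then (l', s')
      else if -l' == v then (l', s')  -- splitting v reproduces v: every later pop is v
      else solveAltAux fuel (rem - m) l' s' ((groups.filter (fun g => !(g.1 == v))) ++ [(-l', m), (-s', m)])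

def solve_alt (n : Int) (k : Int) : List Int :=
  let r := solveAltAux k.toNat k 0 0 [(-n, 1)]
  [r.1, r.2]

-- ===== PRECONDITION & SPEC =====
def Spec_solve (n : Int) (k : Int) (out : List Int) : Prop := out = solve_alt n k
instance (n : Int) (k : Int) (out : List Int) : Decidable (Spec_solve n k out) := by unfold Spec_solve; infer_instance

-- ===== CLAIM (what is proved, stated in full; the proofs are below) =====
def Claim_equal_solve : Prop := ∀ (n : Int) (k : Int), Dom_solve n k → Spec_solve n k (solve n k)

-- ===== LEMMAS AND PROOFS =====

-- flatten a (value, count) group list into the multiset of heap values it represents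
def gflat (groups : List (Int × Int)) : List Int :=
  groups.flatMap (fun g => List.replicate g.2.toNat g.1)

lemma min?_id_eq {h : List Int} {v : Int} (hv : v ∈ h) (hmin : ∀ x ∈ h, v ≤ x) :
    PySem.List.min? h (fun x => x) = some v := by
  cases hm : PySem.List.min? h (fun x => x) with
  | none =>
      rw [PySem.List.min?_eq_none_iff] at hm
      subst hm; cases hv
  | some m =>
      have h1 := PySem.List.min?_mem hm
      have h2 := PySem.List.min?_isMin hm v hv
      have h3 := hmin m h1
      have : m = v := le_antisymm h2 h3
      rw [this]

lemma min?_id_perm {h h' : List Int} (hp : h.Perm h') :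
    PySem.List.min? h (fun x => x) = PySem.List.min? h' (fun x => x) := by
  cases hm : PySem.List.min? h (fun x => x) with
  | none =>
      rw [PySem.List.min?_eq_none_iff] at hm
      subst hm
      have : h' = [] := hp.nil_eq.symm  -- placeholder
      rw [this]
      exact ((PySem.List.min?_eq_none_iff _ _).mpr rfl).symm
  | some m =>
      have h1 := PySem.List.min?_mem hm
      have h2 := PySem.List.min?_isMin hm
      exact (min?_id_eq (hp.mem_iff.mp h1) (fun x hx => h2 x (hp.mem_iff.mpr hx))).symm

lemma solveAux_perm : ∀ (i : Nat) (l s : Int) {h h' : List Int}, h.Perm h' →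
    solveAux i l s h = solveAux i l s h' := by
  intro i
  induction i with
  | zero => intro l s h h' _; rfl
  | succ i ih =>
      intro l s h h' hp
      simp only [solveAux]
      rw [min?_id_perm hp]
      cases hm : PySem.List.min? h' (fun x => x) with
      | none =>
          rw [PySem.List.min?_eq_none_iff] at hm
          subst hm
          have : h = [] := hp.eq_nil
          subst this
          exact ih _ _ (List.Perm.refl _)
      | some m =>
          exact ih _ _ ((hp.erase m).cons _ |>.cons _)

lemma pySplit_bounds {v : Int} (hv : v ≤ 0) :
    v ≤ -(pySplit |v|).1 ∧ v ≤ -(pySplit |v|).2 := by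
  unfold pySplit
  rw [PySem.Int.floordiv_eq_ediv_of_pos (by norm_num : (0:Int) < 2)]
  rw [abs_of_nonpos hv]
  constructor <;> simp only [] <;> omega

lemma pySplit_fst_nonneg {t : Int} (ht : 0 ≤ t) : 0 ≤ (pySplit t).1 := by
  unfold pySplit
  rw [PySem.Int.floordiv_eq_ediv_of_pos (by norm_num : (0:Int) < 2)]
  simp only []
  omega

lemma groupA : ∀ (m i : Nat) (l s v : Int) (rest : List Int),
    0 < m → (∀ x ∈ rest, v ≤ x) →
    (v ≤ -(pySplit |v|).1 ∧ v ≤ -(pySplit |v|).2 ∨ m = 1) →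
    solveAux i l s (List.replicate m v ++ rest) =
      if i = 0 then (l, s)
      else if i ≤ m then ((pySplit |v|).1, (pySplit |v|).2)
      else solveAux (i - m) (pySplit |v|).1 (pySplit |v|).2
             (List.replicate m (-(pySplit |v|).1) ++ List.replicate m (-(pySplit |v|).2) ++ rest) := by
  intro m
  induction m with
  | zero => intro i l s v rest h0; exact absurd h0 (lt_irrefl 0)
  | succ m ih =>
      intro i l s v rest _ hrest hpush
      cases i with
      | zero => simp [solveAux]
      | succ i =>
        have hvmem : v ∈ List.replicate (m+1) v ++ rest := by simp
        have hall : ∀ x ∈ List.replicate (m+1) v ++ rest, v ≤ x := by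
          intro x hx
          rcases List.mem_append.mp hx with h | h
          · rw [List.eq_of_mem_replicate h]
          · exact hrest x h
        have herase : (List.replicate (m+1) v ++ rest).erase v = List.replicate m v ++ rest := by
          rw [List.replicate_succ, List.cons_append, List.erase_cons_head]
        simp only [solveAux, min?_id_eq hvmem hall, Option.getD_some, herase]
        cases m with
        | zero =>
            cases i with
            | zero => simp [solveAux]
            | succ i =>
                simp only [List.replicate_zero, List.nil_append]
                have hif : ¬ (i + 1 + 1 = 0) := by omega
                have hif2 : ¬ (i + 1 + 1 ≤ 1) := by omega
                rw [if_neg hif, if_neg hif2]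
                have : i + 1 + 1 - 1 = i + 1 := by omega
                rw [this]
                apply solveAux_perm
                simp
        | succ m =>
            have hp : v ≤ -(pySplit |v|).1 ∧ v ≤ -(pySplit |v|).2 := by
              rcases hpush with h | h
              · exact h
              · omega
            have hrest' : ∀ x ∈ (-(pySplit |v|).1) :: (-(pySplit |v|).2) :: rest, v ≤ x := by
              intro x hx
              rcases hx with _ | ⟨_, hx⟩
              · exact hp.1
              · rcases hx with _ | ⟨_, hx⟩
                · exact hp.2
                · exact hrest x hx
            have hperm1 : ((-(pySplit |v|).1) :: (-(pySplit |v|).2) :: (List.replicate (m+1) v ++ rest)).Perm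
                (List.replicate (m+1) v ++ ((-(pySplit |v|).1) :: (-(pySplit |v|).2) :: rest)) := by
              refine List.perm_iff_count.mpr ?_
              intro x
              simp only [List.count_append, List.count_cons, List.count_replicate]
              split_ifs <;> omega
            rw [solveAux_perm _ _ _ hperm1]
            rw [ih i (pySplit |v|).1 (pySplit |v|).2 v _ (by omega) hrest' (Or.inl hp)]
            by_cases h1 : i ≤ m + 1
            · rw [if_neg (by omega : ¬ (i+1 = 0)), if_pos (by omega : i+1 ≤ m+1+1)]
              split_ifs <;> rfl
            · rw [if_neg h1, if_neg (by omega : ¬ (i = 0)),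
                if_neg (by omega : ¬ (i+1 = 0)), if_neg (by omega : ¬ (i+1 ≤ m+1+1))]
              have : i + 1 - (m + 1 + 1) = i - (m + 1) := by omega
              rw [this]
              apply solveAux_perm
              refine List.perm_iff_count.mpr ?_
              intro x
              simp only [List.count_append, List.count_cons, List.count_replicate]
              split_ifs <;> omega

lemma pySplit_snd_le_fst (t : Int) : (pySplit t).2 ≤ (pySplit t).1 := by
  simp [pySplit]

lemma stuckA : ∀ (i : Nat) (l s v : Int) (heap : List Int), 0 < i → v ∈ heap →
    (∀ x ∈ heap, v ≤ x) → -(pySplit |v|).1 = v →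
    solveAux i l s heap = ((pySplit |v|).1, (pySplit |v|).2) := by
  intro i
  induction i with
  | zero => intro _ _ _ _ h0; exact absurd h0 (lt_irrefl 0)
  | succ i ih =>
      intro l s v heap _ hmem hall hfix
      simp only [solveAux, min?_id_eq hmem hall, Option.getD_some]
      cases i with
      | zero => rfl
      | succ i =>
          apply ih _ _ v _ (by omega)
          · rw [hfix]; exact List.mem_cons_self
          · intro x hx
            rcases hx with _ | ⟨_, hx⟩
            · omega
            · rcases hx with _ | ⟨_, hx⟩
              · have := pySplit_snd_le_fst |v|
                omega
              · exact hall x (List.mem_of_mem_erase hx)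
          · exact hfix

lemma gflat_append (a b : List (Int × Int)) : gflat (a ++ b) = gflat a ++ gflat b := by
  simp [gflat]

lemma gflat_const : ∀ (gs : List (Int × Int)) (v : Int), (∀ g ∈ gs, g.1 = v) → (∀ g ∈ gs, 1 ≤ g.2) →
    gflat gs = List.replicate ((gs.map Prod.snd).sum).toNat v := by
  intro gs
  induction gs with
  | nil => intro v _ _; simp [gflat]
  | cons g t ih =>
      intro v hk hc
      have h1 : g.1 = v := hk g (by simp)
      have h2 : (1:Int) ≤ g.2 := hc g (by simp)
      have hsum : (0:Int) ≤ (t.map Prod.snd).sum :=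
        List.sum_nonneg (by intro x hx; rcases List.mem_map.mp hx with ⟨a, ha, rfl⟩; have := hc a (by simp [ha]); omega)
      have ihe := ih v (fun a ha => hk a (by simp [ha])) (fun a ha => hc a (by simp [ha]))
      simp only [gflat, List.flatMap_cons] at *
      rw [ihe, h1, List.map_cons, List.sum_cons]
      rw [← List.replicate_add]
      congr 1
      omega

lemma mainEquiv : ∀ (fuel : Nat) (rem l s : Int) (groups : List (Int × Int)) (heap : List Int),
    rem ≤ (fuel : Int) →
    (gflat groups).Perm heap →
    (∀ g ∈ groups, 1 ≤ g.2) →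
    ((∃ x ∈ heap, x ≤ 0) ∨ ∃ y, heap = [y]) →
    solveAux rem.toNat l s heap = solveAltAux fuel rem l s groups := by
  intro fuel
  induction fuel with
  | zero =>
      intro rem l s groups heap hle _ _ _
      have h0 : rem.toNat = 0 := by omega
      rw [h0]; rfl
  | succ fuel ih =>
      intro rem l s groups heap hle hperm hcnt hgood
      by_cases hrem : rem ≤ 0
      · have h0 : rem.toNat = 0 := by
          omega
        rw [h0]
        simp only [solveAltAux, if_pos hrem]
        rfl
      · rw [not_le] at hrem
        have hne : heap ≠ [] := by
          rcases hgood with ⟨x, hx, _⟩ | ⟨y, hy⟩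
          · intro h; subst h; exact absurd hx (List.not_mem_nil)
          · subst hy; simp
        have hgne : groups ≠ [] := by
          intro h; subst h
          exact hne hperm.symm.eq_nil
        obtain ⟨vB, hvB⟩ : ∃ vB, PySem.List.min? (groups.map Prod.fst) (fun x => x) = some vB := by
          cases h : PySem.List.min? (groups.map Prod.fst) (fun x => x) with
          | none =>
              rw [PySem.List.min?_eq_none_iff] at h
              exact absurd (List.map_eq_nil_iff.mp h) hgne
          | some m => exact ⟨m, rfl⟩
        have hvmem1 : vB ∈ groups.map Prod.fst := PySem.List.min?_mem hvB
        have hvmin1 : ∀ x ∈ groups.map Prod.fst, vB ≤ x := PySem.List.min?_isMin hvB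
        have hkeyflat : ∀ g ∈ groups, g.1 ∈ gflat groups := by
          intro g hg
          have h2 : 1 ≤ g.2 := hcnt g hg
          refine List.mem_flatMap.mpr ⟨g, hg, ?_⟩
          exact List.mem_replicate.mpr ⟨by omega, rfl⟩
        have hflatkeys : ∀ x ∈ gflat groups, x ∈ groups.map Prod.fst := by
          intro x hx
          rcases List.mem_flatMap.mp hx with ⟨g, hg, hxg⟩
          rcases List.mem_replicate.mp hxg with ⟨_, rfl⟩
          exact List.mem_map.mpr ⟨g, hg, rfl⟩
        rcases List.mem_map.mp hvmem1 with ⟨g0, hg0, hg0v⟩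
        have hvheap : vB ∈ heap := hperm.mem_iff.mp (hg0v ▸ hkeyflat g0 hg0)
        have hvminheap : ∀ x ∈ heap, vB ≤ x := fun x hx => hvmin1 x (hflatkeys x (hperm.mem_iff.mpr hx))
        -- unfold one step of B
        simp only [solveAltAux, hvB, Option.getD_some]
        rw [if_neg (by omega : ¬ rem ≤ 0)]
        set P := groups.filter (fun g => g.1 == vB) with hP
        set Q := groups.filter (fun g => !(g.1 == vB)) with hQ
        set mB : Int := (P.map Prod.snd).sum with hmB
        have hpart : (gflat (P ++ Q)).Perm (gflat groups) :=
          List.Perm.flatMap (List.filter_append_perm _ groups) (fun a _ => List.Perm.refl _)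
        have hPkeys : ∀ g ∈ P, g.1 = vB := by
          intro g hg
          have := (List.mem_filter.mp hg).2
          simpa using this
        have hPcnt : ∀ g ∈ P, 1 ≤ g.2 := fun g hg => hcnt g (List.mem_filter.mp hg).1
        have hQcnt : ∀ g ∈ Q, 1 ≤ g.2 := fun g hg => hcnt g (List.mem_filter.mp hg).1
        have hPflat : gflat P = List.replicate mB.toNat vB := gflat_const P vB hPkeys hPcnt
        have hg0P : g0 ∈ P := List.mem_filter.mpr ⟨hg0, by simp [hg0v]⟩
        have hmB1 : 1 ≤ mB := by
          have h1 : g0.2 ∈ P.map Prod.snd := List.mem_map.mpr ⟨g0, hg0P, rfl⟩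
          have h2 : g0.2 ≤ mB :=
            List.single_le_sum
              (by intro x hx; rcases List.mem_map.mp hx with ⟨a, ha, rfl⟩; have := hPcnt a ha; omega)
              _ h1
          have := hcnt g0 hg0
          omega
        have hheap : heap.Perm (List.replicate mB.toNat vB ++ gflat Q) := by
          have h1 : heap.Perm (gflat (P ++ Q)) := hperm.symm.trans hpart.symm
          rw [gflat_append, hPflat] at h1
          exact h1
        have hrestQ : ∀ x ∈ gflat Q, vB ≤ x := by
          intro x hx
          exact hvminheap x (hheap.mem_iff.mpr (List.mem_append.mpr (Or.inr hx)))
        have hpush : vB ≤ -(pySplit |vB|).1 ∧ vB ≤ -(pySplit |vB|).2 ∨ mB.toNat = 1 := by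
          rcases hgood with ⟨x, hx, hx0⟩ | ⟨y, hy⟩
          · exact Or.inl (pySplit_bounds (le_trans (hvminheap x hx) hx0))
          · right
            have hlen := hheap.length_eq
            rw [hy] at hlen
            simp [List.length_append] at hlen
            omega
        rw [solveAux_perm _ _ _ hheap]
        rw [groupA mB.toNat rem.toNat l s vB (gflat Q) (by omega) hrestQ hpush]
        rw [if_neg (by omega : ¬ rem.toNat = 0)]
        by_cases hcase : rem ≤ mB
        · rw [if_pos (by omega : rem.toNat ≤ mB.toNat), if_pos hcase]
          simp [pySplit]
        · rw [if_neg (by omega : ¬ rem.toNat ≤ mB.toNat), if_neg hcase]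
          by_cases hfb : (-max (|vB| - 1 - PySem.Int.floordiv (|vB| - 1) 2) (PySem.Int.floordiv (|vB| - 1) 2) == vB) = true
          · have hfixb : -(pySplit |vB|).1 = vB := by simpa [pySplit] using hfb
            rw [if_pos hfb]
            rw [stuckA (rem.toNat - mB.toNat) _ _ vB _ (by omega)
              (List.mem_append.mpr (Or.inl (List.mem_append.mpr (Or.inl
                    (List.mem_replicate.mpr ⟨by omega, hfixb.symm⟩)))))
              (by intro x hx
                  rcases List.mem_append.mp hx with h | h
                  · rcases List.mem_append.mp h with h | h
                    · rw [List.eq_of_mem_replicate h]; omega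
                    · rw [List.eq_of_mem_replicate h]
                      have := pySplit_snd_le_fst |vB|
                      omega
                  · exact hrestQ x h)
              hfixb]
            simp [pySplit]
          · have hfixb : ¬ -(pySplit |vB|).1 = vB := by simpa [pySplit] using hfb
            rw [if_neg hfb]
            have hnat : rem.toNat - mB.toNat = (rem - mB).toNat := by omega
            rw [hnat]
            have hperm' : (gflat (Q ++ [(-(pySplit |vB|).1, mB), (-(pySplit |vB|).2, mB)])).Perm
                (List.replicate mB.toNat (-(pySplit |vB|).1) ++ List.replicate mB.toNat (-(pySplit |vB|).2) ++ gflat Q) := by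
              rw [gflat_append]
              refine List.perm_iff_count.mpr ?_
              intro x
              simp only [gflat, List.flatMap_cons, List.flatMap_nil, List.append_nil,
                List.count_append, List.count_replicate]
              split_ifs <;> omega
            have hcnt' : ∀ g ∈ Q ++ [(-(pySplit |vB|).1, mB), (-(pySplit |vB|).2, mB)], 1 ≤ g.2 := by
              intro g hg
              rcases List.mem_append.mp hg with h | h
              · exact hQcnt g h
              · rcases h with _ | ⟨_, h⟩
                · exact hmB1
                · rcases h with _ | ⟨_, h⟩
                  · exact hmB1
                  · exact absurd h (List.not_mem_nil)
            have hgood' : (∃ x ∈ List.replicate mB.toNat (-(pySplit |vB|).1) ++ List.replicate mB.toNat (-(pySplit |vB|).2) ++ gflat Q, x ≤ 0) ∨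
                ∃ y, List.replicate mB.toNat (-(pySplit |vB|).1) ++ List.replicate mB.toNat (-(pySplit |vB|).2) ++ gflat Q = [y] := by
              left
              refine ⟨-(pySplit |vB|).1, ?_, ?_⟩
              · exact List.mem_append.mpr (Or.inl (List.mem_append.mpr (Or.inl
                  (List.mem_replicate.mpr ⟨by omega, rfl⟩))))
              · have := pySplit_fst_nonneg (abs_nonneg vB)
                omega
            have hih := ih (rem - mB) (pySplit |vB|).1 (pySplit |vB|).2
              (Q ++ [(-(pySplit |vB|).1, mB), (-(pySplit |vB|).2, mB)])
              (List.replicate mB.toNat (-(pySplit |vB|).1) ++ List.replicate mB.toNat (-(pySplit |vB|).2) ++ gflat Q)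
              (by omega) hperm' hcnt' hgood'
            rw [hih]
            simp [pySplit]

-- ===== VERDICT (by name: the statement is the Claim_ definition above) =====
theorem solve_spec : Claim_equal_solve := by
  intro n k _
  unfold Spec_solve solve solve_alt
  have h := mainEquiv k.toNat k 0 0 [(-n, 1)] [-n] (by omega)
    (by simp [gflat]) (by simp) (Or.inr ⟨-n, rfl⟩)
  rw [h]
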